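-- pv_equiv track=rewrite | github.com/jar145/advent_of_code | src/advent_of_code/day9/day9.py | find_all_differences
-- ===== SOURCE A (Python) =====
-- def find_differences(row: list[int]) -> list[int]:
--     differences = []
--     for i in range(len(row) - 1):
--         diff = row[i + 1] - row[i]
--         differences.append(diff)
--
--     return differences
--
-- def find_all_differences(listing: list[int]) -> list[list[int]]:
--     diff_list = []
--     diff = find_differences(listing)
--     diff_list.append(diff)
--
--     while not all(i == 0 for i in diff):
--         diff = find_differences(diff)
--         diff_list.append(diff)
--
--     diff_list.insert(0, listing)
--     return diff_list
-- ===== SOURCE B (Python) =====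
-- def find_all_differences(listing: list[int]) -> list[list[int]]:
--     # Recursive decomposition: each level is self-similar, diff rows via zip.
--     def build(row):
--         d = [b - a for a, b in zip(row, row[1:])]
--         if all(x == 0 for x in d):
--             return [d]
--         return [d] + build(d)
--
--     return [listing] + build(listing)
-- ===== Notes on version B (the rewrite author's own statement) =====
-- stated objective: alternative
-- what changed: The explicit while-loop accumulator over successive difference rows is replaced by a recursive helper build(row) over the self-similar pyramid, and the index-based diff loop is replaced by a zip comprehension.
import Mathlib
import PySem

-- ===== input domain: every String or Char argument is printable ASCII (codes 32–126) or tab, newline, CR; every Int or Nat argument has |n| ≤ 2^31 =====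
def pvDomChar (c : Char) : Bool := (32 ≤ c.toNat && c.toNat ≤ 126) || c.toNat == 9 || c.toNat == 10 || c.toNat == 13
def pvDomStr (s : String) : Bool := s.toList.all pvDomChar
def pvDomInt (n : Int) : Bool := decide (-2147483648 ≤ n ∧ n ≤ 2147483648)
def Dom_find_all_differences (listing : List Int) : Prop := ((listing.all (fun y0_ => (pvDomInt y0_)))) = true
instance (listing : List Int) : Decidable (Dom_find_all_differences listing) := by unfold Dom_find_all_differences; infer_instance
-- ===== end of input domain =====

-- B replaces A's while-loop accumulator by a recursive helper over the self-similar
-- pyramid and computes each diff row with zip instead of an index loop (alternative; same cost).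

-- ===== PORT A =====
-- helper find_differences: for i in range(len(row)-1): differences.append(row[i+1]-row[i])
def find_differencesA (row : List Int) : List Int :=
  (PySem.List.pyRange 0 ((row.length : Int) - 1) 1).foldl
    (fun differences i =>
      differences ++ [PySem.List.pyGetD row (i + 1) 0 - PySem.List.pyGetD row i 0]) []

-- needed by loopA's termination proof (cited by name in decreasing_by)
theorem fdA_eq_map (row : List Int) :
    find_differencesA row =
      (PySem.List.pyRange 0 ((row.length : Int) - 1) 1).map
        (fun i => PySem.List.pyGetD row (i + 1) 0 - PySem.List.pyGetD row i 0) := by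
  simp only [find_differencesA, PySem.List.foldl_append_singleton_eq_map, List.nil_append]

theorem length_fdA (row : List Int) :
    (find_differencesA row).length = row.length - 1 := by
  rw [fdA_eq_map]
  simp [PySem.List.length_pyRange_one]

-- the while loop of A: the rows appended after the first diff row
def loopA (diff : List Int) : List (List Int) :=
  if h : diff.all (fun i => i == 0) then []
  else find_differencesA diff :: loopA (find_differencesA diff)
termination_by diff.length
decreasing_by
  rw [length_fdA]
  have h0 : 0 < diff.length := by
    cases diff with
    | nil => simp at h
    | cons a t => simp
  omega

def find_all_differences (listing : List Int) : List (List Int) :=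
  let diff := find_differencesA listing
  let diff_list := [diff]
  listing :: (diff_list ++ loopA diff)

-- ===== PORT B =====
-- d = [b - a for a, b in zip(row, row[1:])]
def find_differencesB (row : List Int) : List Int :=
  List.zipWith (fun a b => b - a) row row.tail

def buildB (row : List Int) : List (List Int) :=
  if h : (find_differencesB row).all (fun x => x == 0) then [find_differencesB row]
  else find_differencesB row :: buildB (find_differencesB row)
termination_by row.length
decreasing_by
  have h0 : 0 < row.length := by
    cases row with
    | nil => simp [find_differencesB] at h
    | cons a t => simp
  simp only [find_differencesB, List.length_zipWith, List.length_tail]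
  omega

def find_all_differences_alt (listing : List Int) : List (List Int) :=
  listing :: buildB listing

-- ===== PRECONDITION & SPEC =====
def Spec_find_all_differences (listing : List Int) (out : List (List Int)) : Prop := out = find_all_differences_alt listing
instance (listing : List Int) (out : List (List Int)) : Decidable (Spec_find_all_differences listing out) := by unfold Spec_find_all_differences; infer_instance

-- ===== CLAIM (what is proved, stated in full; the proofs are below) =====
def Claim_equal_find_all_differences : Prop := ∀ (listing : List Int), Dom_find_all_differences listing → Spec_find_all_differences listing (find_all_differences listing)

-- ===== LEMMAS AND PROOFS =====

-- the two diff-row computations agree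
theorem fd_eq (row : List Int) : find_differencesA row = find_differencesB row := by
  rw [fdA_eq_map]
  apply List.ext_getElem
  · simp [find_differencesB, PySem.List.length_pyRange_one]
  · intro i h1 h2
    have hi : i < row.length - 1 := by
      simp [PySem.List.length_pyRange_one] at h1
      omega
    simp only [find_differencesB, List.getElem_map, PySem.List.getElem_pyRange_one,
      List.getElem_zipWith, List.getElem_tail]
    rw [show ((0 : Int) + (i : Int) + 1) = ((i + 1 : Nat) : Int) by push_cast; ring,
        show ((0 : Int) + (i : Int)) = ((i : Nat) : Int) by omega,
        PySem.List.pyGetD_natCast, PySem.List.pyGetD_natCast,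
        List.getD_eq_getElem _ _ (by omega), List.getD_eq_getElem _ _ (by omega)]

-- B's recursion produces exactly the first diff row followed by A's loop output
theorem build_eq (n : Nat) : ∀ row : List Int, row.length ≤ n →
    buildB row = find_differencesB row :: loopA (find_differencesB row) := by
  induction n with
  | zero =>
    intro row hr
    have hrow : row = [] := by cases row with | nil => rfl | cons a t => simp at hr
    subst hrow
    rw [buildB, loopA]
    simp [find_differencesB]
  | succ n ih =>
    intro row hr
    rw [buildB]
    by_cases hall : (find_differencesB row).all (fun x => x == 0) = true
    · rw [dif_pos hall, loopA, dif_pos hall]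
    · rw [dif_neg hall, loopA, dif_neg hall, fd_eq]
      congr 1
      have h0 : 0 < row.length := by
        cases row with
        | nil => simp [find_differencesB] at hall
        | cons a t => simp
      have hlen : (find_differencesB row).length ≤ n := by
        simp only [find_differencesB, List.length_zipWith, List.length_tail]
        omega
      exact ih _ hlen

-- ===== VERDICT (by name: the statement is the Claim_ definition above) =====
theorem find_all_differences_spec : Claim_equal_find_all_differences := by
  intro listing _
  show listing :: ([find_differencesA listing] ++ loopA (find_differencesA listing)) =
    listing :: buildB listing
  rw [fd_eq, build_eq listing.length listing le_rfl]
  simp
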